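-- pv_equiv track=rewrite | github.com/rish664/pipeshub-ai | backend/python/app/modules/parsers/csv/csv_parser.py | _select_representative_sample_rows
-- ===== SOURCE A (Python) =====
-- from typing import Any, Dict, List, Optional, TextIO, Tuple, Union
--
-- MAX_HEADER_GENERATION_ROWS = 10  # Maximum number of rows to use for header generation
--
-- def _select_representative_sample_rows(
--     raw_rows: List[List[Any]]
-- ) -> List[List[Any]]:
--     """
--     Select representative sample rows from CSV data by prioritizing rows with fewer empty values.
--
--     This method selects up to num_sample_rows rows, prioritizing:
--     1. Perfect rows with no empty values (stops early if enough are found)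
--     2. Rows with the fewest empty values as fallback
--
--     Args:
--         csv_result: List of dictionaries representing CSV rows
--         num_sample_rows: Number of sample rows to select (default: 5)
--
--     Returns:
--         List of tuples (row_index, row_dict, empty_count) sorted by original index
--     """
--     selected_rows = []
--     fallback_rows = []
--
--     for idx, row in enumerate(raw_rows):
--         empty_count = sum(1 for value in row if value == "null")
--
--         if empty_count == 0:
--             # Perfect row with no empty values
--             selected_rows.append((idx, row, empty_count))
--             if len(selected_rows) >= MAX_HEADER_GENERATION_ROWS:
--                 break  # Early stop - found enough perfect rows
--         else:
--             # Keep track of best non-perfect rows as fallback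
--             fallback_rows.append((idx, row, empty_count))
--
--     # If we didn't find enough perfect rows, supplement with the best fallback rows
--     if len(selected_rows) < MAX_HEADER_GENERATION_ROWS:
--         # Sort fallback rows by empty count (ascending), then by index
--         fallback_rows.sort(key=lambda x: (x[2], x[0]))
--         # Add the best fallback rows to reach the target count
--         needed = MAX_HEADER_GENERATION_ROWS - len(selected_rows)
--         selected_rows.extend(fallback_rows[:needed])
--
--     # Sort by original index to maintain logical order
--     selected_rows.sort(key=lambda x: x[0])
--
--     return [row for _, row, _ in selected_rows]
-- ===== SOURCE B (Python) =====
-- MAX_HEADER_GENERATION_ROWS = 10  # Maximum number of rows to use for header generation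
--
-- def _select_representative_sample_rows(raw_rows):
--     # Decorate every row once, pick the globally best rows in a single sort,
--     # then restore original index order.
--     decorated = [(idx, row, sum(1 for value in row if value == "null"))
--                  for idx, row in enumerate(raw_rows)]
--     decorated.sort(key=lambda t: (t[2], t[0]))
--     best = decorated[:MAX_HEADER_GENERATION_ROWS]
--     best.sort(key=lambda t: t[0])
--     return [row for _, row, _ in best]
-- ===== Notes on version B (the rewrite author's own statement) =====
-- stated objective: simpler
-- what changed: Replaced the perfect/fallback two-bucket loop with early break and conditional supplement by a single decorate-sort-take-resort pipeline: decorate each row with (index, row, null-count), sort all rows once by (count, index), take the first 10, re-sort by index.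
import Mathlib
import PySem

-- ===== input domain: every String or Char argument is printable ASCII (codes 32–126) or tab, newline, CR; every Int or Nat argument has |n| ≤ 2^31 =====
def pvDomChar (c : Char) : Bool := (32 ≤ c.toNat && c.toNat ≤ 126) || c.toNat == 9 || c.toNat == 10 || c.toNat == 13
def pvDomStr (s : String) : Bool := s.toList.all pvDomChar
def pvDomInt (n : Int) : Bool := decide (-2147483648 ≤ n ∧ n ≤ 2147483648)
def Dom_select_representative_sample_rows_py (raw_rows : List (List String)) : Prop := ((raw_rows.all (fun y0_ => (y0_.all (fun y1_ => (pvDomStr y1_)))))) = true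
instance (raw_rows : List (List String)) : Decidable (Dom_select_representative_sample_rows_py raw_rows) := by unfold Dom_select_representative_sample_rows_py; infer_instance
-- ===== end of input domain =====

-- B replaces A's perfect/fallback two-bucket loop (with early break) by one decorate → global sort by
-- (null-count, index) → take 10 → re-sort by index pipeline: simpler, same result.


-- ===== PORT A =====
-- sum(1 for value in row if value == "null")  (the same expression appears in both Pythons)
def pvCount (row : List String) : Int :=
  (row.map (fun value => if value == "null" then (1 : Int) else 0)).sum

-- A's for-loop over enumerate(raw_rows), with its early break (state: selected_rows, fallback_rows)
def pvLoopA : List (Int × List String) → List (Int × List String × Int) → List (Int × List String × Int) →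
    List (Int × List String × Int) × List (Int × List String × Int)
  | [], sel, fb => (sel, fb)
  | (idx, row) :: rest, sel, fb =>
    let empty_count := pvCount row
    if empty_count = 0 then
      let sel' := sel ++ [(idx, row, empty_count)]
      if 10 ≤ sel'.length then (sel', fb)   -- break
      else pvLoopA rest sel' fb
    else pvLoopA rest sel (fb ++ [(idx, row, empty_count)])

def select_representative_sample_rows_py (raw_rows : List (List String)) : List (List String) :=
  let p := pvLoopA (PySem.List.enumerate raw_rows) [] []
  let sel := p.1
  let fb := p.2
  let sel2 := if sel.length < 10 then
      sel ++ (PySem.List.sorted2 fb (fun x => x.2.2) (fun x => x.1)).take (10 - sel.length)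
    else sel
  (PySem.List.sorted sel2 (fun x => x.1)).map (fun x => x.2.1)

-- ===== PORT B =====
def select_representative_sample_rows_py_alt (raw_rows : List (List String)) : List (List String) :=
  let decorated := (PySem.List.enumerate raw_rows).map (fun p => (p.1, p.2, pvCount p.2))
  let best := (PySem.List.sorted2 decorated (fun t => t.2.2) (fun t => t.1)).take 10
  (PySem.List.sorted best (fun t => t.1)).map (fun t => t.2.1)

-- ===== PRECONDITION & SPEC =====
def Spec_select_representative_sample_rows_py (raw_rows : List (List String)) (out : List (List String)) : Prop := out = select_representative_sample_rows_py_alt raw_rows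
instance (raw_rows : List (List String)) (out : List (List String)) : Decidable (Spec_select_representative_sample_rows_py raw_rows out) := by unfold Spec_select_representative_sample_rows_py; infer_instance

-- ===== CLAIM (what is proved, stated in full; the proofs are below) =====
def Claim_equal_select_representative_sample_rows_py : Prop := ∀ (raw_rows : List (List String)), Dom_select_representative_sample_rows_py raw_rows → Spec_select_representative_sample_rows_py raw_rows (select_representative_sample_rows_py raw_rows)

-- ===== LEMMAS AND PROOFS =====

def pvDec (L : List (Int × List String)) : List (Int × List String × Int) :=
  L.map (fun p => (p.1, p.2, pvCount p.2))
def pvPerf (L : List (Int × List String)) : List (Int × List String × Int) :=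
  (pvDec L).filter (fun t => decide (t.2.2 = 0))
def pvFall (L : List (Int × List String)) : List (Int × List String × Int) :=
  (pvDec L).filter (fun t => !decide (t.2.2 = 0))

theorem pvLoopA_no_break : ∀ (L : List (Int × List String)) (sel fb : List (Int × List String × Int)),
    sel.length + (pvPerf L).length < 10 →
    pvLoopA L sel fb = (sel ++ pvPerf L, fb ++ pvFall L) := by
  intro L
  induction L with
  | nil => intro sel fb h; simp [pvLoopA, pvPerf, pvFall, pvDec]
  | cons x rest ih =>
    obtain ⟨i, r⟩ := x
    intro sel fb h
    by_cases hc : pvCount r = 0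
    · have hperf : pvPerf ((i,r)::rest) = (i,r,pvCount r) :: pvPerf rest := by
        simp [pvPerf, pvDec, hc]
      have hfall : pvFall ((i,r)::rest) = pvFall rest := by
        simp [pvFall, pvDec, hc]
      rw [hperf] at h
      simp only [List.length_cons] at h
      have hlen : ¬ 10 ≤ (sel ++ [(i,r,pvCount r)]).length := by
        simp; omega
      simp only [pvLoopA, if_pos hc, if_neg hlen]
      rw [ih _ fb (by simp; omega)]
      rw [hperf, hfall]
      simp
    · have hperf : pvPerf ((i,r)::rest) = pvPerf rest := by
        simp [pvPerf, pvDec, hc]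
      have hfall : pvFall ((i,r)::rest) = (i,r,pvCount r) :: pvFall rest := by
        simp [pvFall, pvDec, hc]
      rw [hperf] at h
      simp only [pvLoopA, if_neg hc]
      rw [ih _ _ h, hperf, hfall]
      simp

theorem pvLoopA_break : ∀ (L : List (Int × List String)) (sel fb : List (Int × List String × Int)),
    sel.length < 10 → 10 ≤ sel.length + (pvPerf L).length →
    (pvLoopA L sel fb).1 = (sel ++ pvPerf L).take 10 := by
  intro L
  induction L with
  | nil => intro sel fb h1 h2; simp [pvPerf, pvDec] at h2; omega
  | cons x rest ih =>
    obtain ⟨i, r⟩ := x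
    intro sel fb h1 h2
    by_cases hc : pvCount r = 0
    · have hperf : pvPerf ((i,r)::rest) = (i,r,pvCount r) :: pvPerf rest := by
        simp [pvPerf, pvDec, hc]
      rw [hperf] at h2 ⊢
      simp only [List.length_cons] at h2
      by_cases hlen : 10 ≤ (sel ++ [(i,r,pvCount r)]).length
      · simp only [pvLoopA, if_pos hc, if_pos hlen]
        simp at hlen
        have hsl : sel.length + 1 = 10 := by omega
        rw [show sel ++ (i,r,pvCount r) :: pvPerf rest = (sel ++ [(i,r,pvCount r)]) ++ pvPerf rest by simp]
        rw [List.take_append]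
        have h10 : (sel ++ [(i,r,pvCount r)]).length = 10 := by simp; omega
        rw [List.take_of_length_le (by omega), h10]
        simp
      · simp only [pvLoopA, if_pos hc, if_neg hlen]
        simp at hlen
        rw [ih _ fb (by simp; omega) (by simp; omega)]
        simp
    · have hperf : pvPerf ((i,r)::rest) = pvPerf rest := by
        simp [pvPerf, pvDec, hc]
      rw [hperf] at h2 ⊢
      simp only [pvLoopA, if_neg hc]
      exact ih _ _ h1 h2
theorem pvSorted2_eq_sorted_lex {α : Type} (xs : List α) (k1 k2 : α → Int) :
    PySem.List.sorted2 xs k1 k2 = PySem.List.sorted xs (fun x => toLex (k1 x, k2 x)) := by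
  rw [PySem.List.sorted_eq_foldl_insertBy]
  show List.foldl _ [] xs = _
  have hb : (fun a b => decide (k1 a < k1 b) || (!decide (k1 b < k1 a) && decide (k2 a < k2 b)))
      = (fun a b => decide ((fun x => toLex (k1 x, k2 x)) a < (fun x => toLex (k1 x, k2 x)) b)) := by
    funext a b
    by_cases h1 : k1 a < k1 b <;> by_cases h2 : k1 b < k1 a <;> by_cases h3 : k2 a < k2 b <;>
      simp [Prod.Lex.lt_iff, h1, h2, h3] <;> omega
  rw [hb]
  simp

theorem pvSorted2_dec (L : List (Int × List String))
    (hp : (pvDec L).Pairwise (fun a b => a.1 < b.1)) :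
    PySem.List.sorted2 (pvDec L) (fun t => t.2.2) (fun t => t.1)
      = pvPerf L ++ PySem.List.sorted2 (pvFall L) (fun t => t.2.2) (fun t => t.1) := by
  rw [pvSorted2_eq_sorted_lex, pvSorted2_eq_sorted_lex]
  set key : Int × List String × Int → Int ×ₗ Int := fun t => toLex (t.2.2, t.1) with hkey
  have hinj : ∀ a b : Int × List String × Int, key a = key b → a.2.2 = b.2.2 ∧ a.1 = b.1 := by
    intro a b h
    have := toLex.injective h
    exact ⟨congrArg Prod.fst this, congrArg Prod.snd this⟩
  apply PySem.List.sorted_eq_of_perm_of_pairwise_lt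
  · exact ((PySem.List.sorted_perm (pvFall L) key false).append_left (pvPerf L)).trans
      (List.filter_append_perm _ (pvDec L))
  · rw [List.pairwise_append]
    refine ⟨?_, ?_, ?_⟩
    · have h1 : (pvPerf L).Pairwise (fun a b => a.1 < b.1) :=
        hp.sublist List.filter_sublist
      refine h1.imp_of_mem ?_
      intro a b ha hb hlt
      have ha0 : a.2.2 = 0 := by simpa using List.of_mem_filter ha
      have hb0 : b.2.2 = 0 := by simpa using List.of_mem_filter hb
      rw [hkey]
      simp only [Prod.Lex.lt_iff]
      right
      exact ⟨by simp [ha0, hb0], by simpa using hlt⟩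
    · have hle : (PySem.List.sorted (pvFall L) key).Pairwise (fun a b => key a ≤ key b) :=
        PySem.List.sorted_pairwise (pvFall L) key
      have hne0 : (pvFall L).Pairwise (fun a b => a.1 ≠ b.1) :=
        (hp.sublist List.filter_sublist).imp (fun h => ne_of_lt h)
      have hne : (PySem.List.sorted (pvFall L) key).Pairwise (fun a b => a.1 ≠ b.1) :=
        ((PySem.List.sorted_perm (pvFall L) key false).pairwise_iff (fun h => h.symm)).mpr hne0
      refine (hle.and hne).imp ?_
      rintro a b ⟨h1, h2⟩
      exact lt_of_le_of_ne h1 (fun h => h2 (hinj a b h).2)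
    · intro a ha b hb
      have ha0 : a.2.2 = 0 := by simpa using List.of_mem_filter ha
      have hbf : b ∈ pvFall L := (PySem.List.mem_sorted _ _ _ _).mp hb
      have hb0 : b.2.2 ≠ 0 := by simpa using List.of_mem_filter hbf
      have hbd : b ∈ pvDec L := List.mem_of_mem_filter hbf
      have hbc : 0 ≤ b.2.2 := by
        obtain ⟨p, -, hpe⟩ := List.mem_map.mp hbd
        have : b.2.2 = pvCount p.2 := by rw [← hpe]
        rw [this]
        have : pvCount p.2 = ((p.2.countP (fun v => v == "null") : Nat) : Int) := by
          simpa [pvCount] using PySem.List.sum_map_ite_one_zero (fun v => v == "null") p.2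
        rw [this]; exact_mod_cast Nat.zero_le _
      rw [hkey]
      simp only [Prod.Lex.lt_iff]
      left
      show a.2.2 < b.2.2
      omega
theorem pvMain_eq (raw_rows : List (List String)) :
    select_representative_sample_rows_py raw_rows = select_representative_sample_rows_py_alt raw_rows := by
  unfold select_representative_sample_rows_py select_representative_sample_rows_py_alt
  dsimp only
  set E := PySem.List.enumerate raw_rows with hE
  have hdec : (E.map (fun p => (p.1, p.2, pvCount p.2))) = pvDec E := rfl
  have hp : (pvDec E).Pairwise (fun a b => a.1 < b.1) := by
    rw [pvDec, List.pairwise_map]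
    exact (PySem.List.pairwise_lt_enumerate raw_rows 0).imp (fun h => h)
  rw [hdec, pvSorted2_dec E hp]
  by_cases h10 : (pvPerf E).length < 10
  · have hloop := pvLoopA_no_break E [] [] (by simpa using h10)
    rw [hloop]
    simp only [List.nil_append]
    rw [if_pos h10]
    rw [List.take_append, List.take_of_length_le (le_of_lt h10)]
  · have hsel := pvLoopA_break E [] [] (by norm_num) (by simp; omega)
    rw [List.nil_append] at hsel
    rw [hsel]
    rw [if_neg (by rw [List.length_take]; omega)]
    rw [List.take_append, Nat.sub_eq_zero_of_le (by omega), List.take_zero, List.append_nil]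

-- ===== VERDICT (by name: the statement is the Claim_ definition above) =====
theorem select_representative_sample_rows_py_spec : Claim_equal_select_representative_sample_rows_py := by
  intro raw_rows _
  unfold Spec_select_representative_sample_rows_py
  exact pvMain_eq raw_rows
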